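-- pv_equiv track=rewrite | github.com/friendlyFrodo/AdventOfCode | Day_2/day2.py | is_continous
-- ===== SOURCE A (Python) =====
-- def is_continous(value_list) -> bool:
--     is_pos = False
--     is_neg = False
--     for value in value_list:
--         if value > 0:
--             is_pos = True
--         elif value < 0:
--             is_neg = True
--         else:
--             return False
--
--         if is_neg and is_pos:
--             return False
--
--     return True
-- ===== SOURCE B (Python) =====
-- def is_continous(value_list) -> bool:
--     values = list(value_list)
--     return all(v > 0 for v in values) or all(v < 0 for v in values)
-- ===== Notes on version B (the rewrite author's own statement) =====
-- stated objective: simpler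
-- what changed: Replaces the single flag-tracking loop with two independent short-circuiting all() scans (all positive or all negative), after materializing the iterable.
import Mathlib
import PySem

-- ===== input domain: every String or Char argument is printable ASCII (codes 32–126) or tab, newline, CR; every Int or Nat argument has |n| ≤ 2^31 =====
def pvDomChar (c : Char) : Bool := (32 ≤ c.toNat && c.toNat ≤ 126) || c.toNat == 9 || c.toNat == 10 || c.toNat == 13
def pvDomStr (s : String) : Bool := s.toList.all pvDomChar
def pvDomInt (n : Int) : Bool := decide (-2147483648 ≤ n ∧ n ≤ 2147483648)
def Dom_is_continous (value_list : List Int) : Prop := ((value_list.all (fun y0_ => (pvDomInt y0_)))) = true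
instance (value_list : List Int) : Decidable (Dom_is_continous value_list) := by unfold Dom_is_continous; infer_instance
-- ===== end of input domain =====

-- B replaces A's single flag-tracking loop by two independent all() scans; objective: simpler.

-- ===== PORT A =====
-- literal transliteration of A's loop: flags is_pos/is_neg threaded through the recursion,
-- early returns become branch results
def is_continous_loop (is_pos is_neg : Bool) (l : List Int) : Bool :=
  match l with
  | [] => true
  | value :: rest =>
    if value > 0 then
      (if is_neg && true then false else is_continous_loop true is_neg rest)
    else if value < 0 then
      (if true && is_pos then false else is_continous_loop is_pos true rest)
    else
      false

def is_continous (value_list : List Int) : Bool :=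
  is_continous_loop false false value_list

-- ===== PORT B =====
-- two short-circuiting predicate scans, as in Source B
def is_continous_alt (value_list : List Int) : Bool :=
  value_list.all (fun v => v > 0) || value_list.all (fun v => v < 0)

-- ===== PRECONDITION & SPEC =====
def Spec_is_continous (value_list : List Int) (out : Bool) : Prop := out = is_continous_alt value_list
instance (value_list : List Int) (out : Bool) : Decidable (Spec_is_continous value_list out) := by unfold Spec_is_continous; infer_instance

-- ===== CLAIM (what is proved, stated in full; the proofs are below) =====
def Claim_equal_is_continous : Prop := ∀ (value_list : List Int), Dom_is_continous value_list → Spec_is_continous value_list (is_continous value_list)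

-- ===== LEMMAS AND PROOFS =====
theorem is_continous_loop_eq (l : List Int) : ∀ (is_pos is_neg : Bool), ¬(is_pos = true ∧ is_neg = true) →
    is_continous_loop is_pos is_neg l =
      ((!is_pos && l.all (fun v => v < 0)) || (!is_neg && l.all (fun v => v > 0))) := by
  induction l with
  | nil =>
    intro is_pos is_neg h
    cases is_pos <;> cases is_neg <;> simp_all [is_continous_loop]
  | cons v rest ih =>
    intro is_pos is_neg h
    rcases lt_trichotomy v 0 with hn | hz | hp
    · cases is_pos
      · have := ih false true (by simp)
        simp [is_continous_loop, hn, show ¬ v > 0 by omega, this]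
      · simp [is_continous_loop, hn, show ¬ v > 0 by omega]
    · simp [is_continous_loop, hz]
    · cases is_neg
      · have := ih true false (by simp)
        simp [is_continous_loop, hp, show ¬ v < 0 by omega, this]
      · simp [is_continous_loop, hp, show ¬ v < 0 by omega]

-- ===== VERDICT (by name: the statement is the Claim_ definition above) =====
theorem is_continous_spec : Claim_equal_is_continous := by
  intro l _
  unfold Spec_is_continous is_continous is_continous_alt
  rw [is_continous_loop_eq l false false (by simp)]
  simp [Bool.or_comm]
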